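-- pv_equiv track=rewrite | github.com/mirkhosro/shahrvand-scraper | scrape_products.py | augment_keywords_old
-- ===== SOURCE A (Python) =====
-- def augment_keywords_old(keywords):
--     """Augment keywords to generate all possible combinations."""
--     stack = []
--     full_kw = []
--     def gen_for(k : int):
--         stack.append(keywords[k])
--         full_kw.append(" ".join(reversed(stack)))
--         if (k > 0):
--             for i in reversed(range(0, k)):
--                 gen_for(i)
--         stack.pop()
--
--     gen_for(len(keywords) - 1)
--     return("-".join(full_kw))
-- ===== SOURCE B (Python) =====
-- def augment_keywords_old(keywords):
--     """Augment keywords to generate all possible combinations."""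
--     full_kw = []
--     work = [[len(keywords) - 1]]
--     while work:
--         chain = work.pop()
--         full_kw.append(" ".join(keywords[i] for i in reversed(chain)))
--         for i in range(chain[-1]):
--             work.append(chain + [i])
--     return "-".join(full_kw)
-- ===== Notes on version B (the rewrite author's own statement) =====
-- stated objective: alternative
-- what changed: Replaces A's nested recursive closure mutating shared stack/full_kw lists by an iterative depth-first search over an explicit worklist of partial index chains (pop from the end, push children ascending), producing the same preorder of combination strings.
import Mathlib
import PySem

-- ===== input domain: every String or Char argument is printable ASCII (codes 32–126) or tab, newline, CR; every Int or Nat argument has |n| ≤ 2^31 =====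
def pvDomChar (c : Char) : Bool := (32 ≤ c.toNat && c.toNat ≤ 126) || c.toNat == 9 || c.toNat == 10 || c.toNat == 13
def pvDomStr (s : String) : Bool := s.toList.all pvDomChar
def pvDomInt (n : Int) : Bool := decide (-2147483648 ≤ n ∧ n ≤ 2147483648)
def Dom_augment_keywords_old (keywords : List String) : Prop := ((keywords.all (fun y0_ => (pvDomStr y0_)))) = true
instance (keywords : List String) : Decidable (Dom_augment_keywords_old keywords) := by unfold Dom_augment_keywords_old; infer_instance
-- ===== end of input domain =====

-- B replaces A's nested recursion (closure mutating `stack`/`full_kw`) by an iterative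
-- depth-first search over an explicit worklist of index chains; same cost, different decomposition.

-- helper lemma cited by the ports' decreasing_by clauses
lemma pvSumPow (m : Nat) : ((List.range m).map (fun i => 2 ^ i)).sum + 1 = 2 ^ m := by
  induction m with
  | zero => simp
  | succ m ih => simp [List.range_succ, pow_succ]; omega

-- ===== PORT A =====
-- gen_for(k) with its for-loop as a mutual pair; `stack`/`full_kw` become explicit state.
-- keywords[k] is ported as getD k "" : exact because under Pre_ every reached index is in range.
mutual
def pvGenFor (kws : List String) (k : Nat) (stack : List String) (full : List String) : List String :=
  let stack' := stack ++ [kws.getD k ""]              -- stack.append(keywords[k])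
  let full' := full ++ [PySem.Str.join " " stack'.reverse]  -- full_kw.append(" ".join(reversed(stack)))
  if k > 0 then pvGenForLoop kws (List.range k).reverse stack' full' else full'
  -- stack.pop() is implicit: the caller's `stack` is unchanged
termination_by 2 ^ (k + 1)
decreasing_by
  have h : ((List.range k).reverse.map (fun i => 2 ^ (i + 1))).sum
      = ((List.range k).map (fun i => 2 ^ i)).sum * 2 := by
    rw [List.map_reverse, List.sum_reverse, ← List.sum_map_mul_right]
    simp [pow_succ]
  have := pvSumPow k
  simp only [h]
  have : 1 ≤ 2 ^ k := Nat.one_le_two_pow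
  omega

def pvGenForLoop (kws : List String) (is : List Nat) (stack' : List String) (full : List String) : List String :=
  match is with
  | [] => full
  | i :: t => pvGenForLoop kws t stack' (pvGenFor kws i stack' full)
termination_by 1 + (is.map (fun i => 2 ^ (i + 1))).sum
decreasing_by
  · simp only [List.map_cons, List.sum_cons]
    have : 1 ≤ 2 ^ (i + 1) := Nat.one_le_two_pow
    omega
  · simp only [List.map_cons, List.sum_cons]
    have : 1 ≤ 2 ^ (i + 1) := Nat.one_le_two_pow
    omega
end

def augment_keywords_old (keywords : List String) : String :=
  PySem.Str.join "-" (pvGenFor keywords (keywords.length - 1) [] [])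

-- ===== PORT B =====
-- chain[-1] is ported as getLast?.getD 0 : exact, every chain in the worklist is nonempty;
-- chain entries are Nat (the seed len-1 is ≥ 0 under Pre_, children come from range).
-- the Python list-end stack is the Lean list head: pop = head, ascending appends = descending prepend.
def pvLoop (kws : List String) (work : List (List Nat)) (full : List String) : List String :=
  match work with
  | [] => full
  | chain :: rest =>
    let m := chain.getLast?.getD 0                    -- chain[-1]
    let full' := full ++ [PySem.Str.join " " (chain.reverse.map (fun i => kws.getD i ""))]
    pvLoop kws (((List.range m).reverse.map (fun i => chain ++ [i])) ++ rest) full'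
termination_by (work.map (fun c => 2 ^ (c.getLast?.getD 0))).sum
decreasing_by
  have h : (((List.range (chain.getLast?.getD 0)).reverse.map (fun i => chain ++ [i])).map
      (fun c => 2 ^ (c.getLast?.getD 0))).sum
      = ((List.range (chain.getLast?.getD 0)).map (fun i => 2 ^ i)).sum := by
    rw [List.map_map, List.map_reverse, List.sum_reverse]
    simp [Function.comp_def]
  have := pvSumPow (chain.getLast?.getD 0)
  simp only [List.map_append, List.sum_append, List.map_cons, List.sum_cons, h]
  omega

def augment_keywords_old_alt (keywords : List String) : String :=
  PySem.Str.join "-" (pvLoop keywords [[keywords.length - 1]] [])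

-- ===== PRECONDITION & SPEC =====
-- Pre_ excludes only the empty list, on which both A and B raise IndexError (keywords[-1]).
def Pre_augment_keywords_old (keywords : List String) : Prop := keywords ≠ []
instance (keywords : List String) : Decidable (Pre_augment_keywords_old keywords) := by unfold Pre_augment_keywords_old; infer_instance
def pvWitness_augment_keywords_old : List String := ["alpha", "beta"]
def Spec_augment_keywords_old (keywords : List String) (out : String) : Prop := out = augment_keywords_old_alt keywords
instance (keywords : List String) (out : String) : Decidable (Spec_augment_keywords_old keywords out) := by unfold Spec_augment_keywords_old; infer_instance

-- ===== CLAIM (what is proved, stated in full; the proofs are below) =====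
def Claim_equal_augment_keywords_old : Prop := ∀ (keywords : List String), Dom_augment_keywords_old keywords → Pre_augment_keywords_old keywords → Spec_augment_keywords_old keywords (augment_keywords_old keywords)

-- ===== LEMMAS AND PROOFS =====

-- the A-side computation a single worklist entry stands for
def pvStep (kws : List String) (acc : List String) (c : List Nat) : List String :=
  pvGenFor kws (c.getLast?.getD 0) (c.dropLast.map (fun i => kws.getD i "")) acc

lemma pvGenForLoop_foldl (kws : List String) (chain : List Nat) :
    ∀ (is : List Nat) (full : List String),
      pvGenForLoop kws is (chain.map (fun i => kws.getD i "")) full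
        = (is.map (fun i => chain ++ [i])).foldl (pvStep kws) full := by
  intro is
  induction is with
  | nil => intro full; rw [pvGenForLoop.eq_def]; simp
  | cons i t ih =>
    intro full
    rw [pvGenForLoop.eq_def, List.map_cons, List.foldl_cons, ← ih]
    simp [pvStep]

lemma pvStep_eq (kws : List String) (chain : List Nat) (hne : chain ≠ []) (full : List String) :
    pvStep kws full chain
      = pvGenForLoop kws (List.range (chain.getLast?.getD 0)).reverse
          (chain.map (fun i => kws.getD i ""))
          (full ++ [PySem.Str.join " " (chain.reverse.map (fun i => kws.getD i ""))]) := by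
  have hlast : chain.getLast?.getD 0 = chain.getLast hne := by
    rw [List.getLast?_eq_some_getLast hne]; rfl
  have hchain : chain.dropLast ++ [chain.getLast?.getD 0] = chain := by
    rw [hlast]; exact List.dropLast_concat_getLast hne
  rw [pvStep, pvGenFor.eq_def]
  have hstack : chain.dropLast.map (fun i => kws.getD i "") ++ [kws.getD (chain.getLast?.getD 0) ""]
      = chain.map (fun i => kws.getD i "") := by
    conv_rhs => rw [← hchain]
    simp
  simp only [hstack]
  by_cases hm : chain.getLast?.getD 0 > 0
  · simp [hm]
  · have h0 : chain.getLast?.getD 0 = 0 := by omega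
    rw [if_neg hm]
    simp only [h0]
    rw [pvGenForLoop.eq_def]
    simp [List.map_reverse]

lemma pvLoop_foldl (kws : List String) :
    ∀ (n : Nat) (work : List (List Nat)) (full : List String),
      (work.map (fun c => 2 ^ (c.getLast?.getD 0))).sum < n →
      (∀ c ∈ work, c ≠ []) →
      pvLoop kws work full = work.foldl (pvStep kws) full := by
  intro n
  induction n with
  | zero => intro work full h; omega
  | succ n ih =>
    intro work full hmeas hne
    match work with
    | [] => rw [pvLoop.eq_def]; simp
    | chain :: rest =>
      rw [pvLoop.eq_def]
      simp only
      set m := chain.getLast?.getD 0 with hm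
      have hkids : ((((List.range m).reverse.map (fun i => chain ++ [i]))).map
          (fun c => 2 ^ (c.getLast?.getD 0))).sum
          = ((List.range m).map (fun i => 2 ^ i)).sum := by
        rw [List.map_map, List.map_reverse, List.sum_reverse]
        simp [Function.comp_def]
      have hmeas' : ((((List.range m).reverse.map (fun i => chain ++ [i])) ++ rest).map
          (fun c => 2 ^ (c.getLast?.getD 0))).sum < n := by
        rw [List.map_append, List.sum_append, hkids]
        have := pvSumPow m
        have hone : 1 ≤ 2 ^ m := Nat.one_le_two_pow
        simp only [List.map_cons, List.sum_cons, ← hm] at hmeas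
        omega
      rw [ih _ _ hmeas' (by
        intro c hc
        rcases List.mem_append.mp hc with hc | hc
        · obtain ⟨i, _, rfl⟩ := List.mem_map.mp hc
          simp
        · exact hne c (List.mem_cons_of_mem _ hc))]
      rw [List.foldl_append, List.foldl_cons]
      congr 1
      rw [pvStep_eq kws chain (hne chain (List.mem_cons_self)) full]
      rw [pvGenForLoop_foldl]

-- ===== VERDICT (by name: the statement is the Claim_ definition above) =====
theorem augment_keywords_old_spec : Claim_equal_augment_keywords_old := by
  intro kws _ _
  unfold Spec_augment_keywords_old augment_keywords_old augment_keywords_old_alt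
  congr 1
  rw [pvLoop_foldl kws (([[kws.length - 1]].map (fun c => 2 ^ (c.getLast?.getD 0))).sum + 1)
        [[kws.length - 1]] [] (by omega) (by simp)]
  simp [pvStep]
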